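-- pv_equiv track=rewrite | github.com/SafonovVladimir/mornings | 04 april/13/1.py | tv_remote
-- ===== SOURCE A (Python) =====
-- KEYBOARD = "abcde123fghij456klmno789pqrst.@0uvwxyz_/"
--
-- def tv_remote(word: str) -> int:
--     count = x = y = 0
--
--     for char in word:
--         char_index = KEYBOARD.index(char)
--         char_x, char_y = char_index % 8, char_index // 8
--         count += abs(char_x - x) + abs(char_y - y) + 1
--         x, y = char_x, char_y
--
--     return count
-- ===== SOURCE B (Python) =====
-- KEYBOARD = "abcde123fghij456klmno789pqrst.@0uvwxyz_/"
-- _POS = {c: (i % 8, i // 8) for i, c in enumerate(KEYBOARD)}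
--
-- def tv_remote(word: str) -> int:
--     # pass 1: count how often each adjacent key-pair occurs (cursor starts on 'a')
--     freq = {}
--     prev = 'a'
--     for ch in word:
--         key = (prev, ch)
--         freq[key] = freq.get(key, 0) + 1
--         prev = ch
--     # pass 2: one distance computation per DISTINCT pair, weighted by its count
--     total = len(word)
--     for (a, b), n in freq.items():
--         ax, ay = _POS[a]
--         bx, by = _POS[b]
--         total += n * (abs(ax - bx) + abs(ay - by))
--     return total
-- ===== Notes on version B (the rewrite author's own statement) =====
-- stated objective: alternative
-- what changed: Replaces the single stateful loop that calls KEYBOARD.index (a 40-char scan) per character with a two-phase scheme: count adjacent key-pairs into a frequency dict, then add count*distance once per DISTINCT pair using a precomputed char->coordinate dict, so the inner index scan disappears and distances are computed at most once per pair.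
import Mathlib
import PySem

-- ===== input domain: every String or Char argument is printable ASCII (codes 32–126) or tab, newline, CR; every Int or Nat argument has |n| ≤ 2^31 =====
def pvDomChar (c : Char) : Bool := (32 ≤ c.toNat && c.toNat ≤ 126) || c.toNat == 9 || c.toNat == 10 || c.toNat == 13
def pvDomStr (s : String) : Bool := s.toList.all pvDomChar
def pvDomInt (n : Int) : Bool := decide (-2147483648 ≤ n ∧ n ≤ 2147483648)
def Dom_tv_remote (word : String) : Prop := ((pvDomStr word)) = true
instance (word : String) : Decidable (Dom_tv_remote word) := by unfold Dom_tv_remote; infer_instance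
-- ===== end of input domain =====

-- B replaces A's per-character KEYBOARD.index scan + running-state loop with a
-- frequency dict of adjacent key-pairs plus a precomputed char->coordinate dict
-- (one distance computation per distinct pair): an alternative, aggregation-based algorithm.

-- shared module constant KEYBOARD
def pvKB : List Char := "abcde123fghij456klmno789pqrst.@0uvwxyz_/".toList

-- ===== PORT A =====
-- KEYBOARD.index(char); total under Pre_ (char ∈ pvKB)
def pvIdx (c : Char) : Int := ((PySem.List.index? pvKB c).getD 0 : Nat)

def tv_remote (word : String) : Int :=
  (word.toList.foldl
    (fun (s : Int × Int × Int) c =>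
      let i := pvIdx c
      let cx := PySem.Int.mod i 8
      let cy := PySem.Int.floordiv i 8
      (s.1 + |cx - s.2.1| + |cy - s.2.2| + 1, cx, cy))
    (0, 0, 0)).1

-- ===== PORT B =====
-- _POS = {c: (i % 8, i // 8) for i, c in enumerate(KEYBOARD)}
def pvPosD : PySem.Dict Char (Int × Int) :=
  (PySem.List.enumerate pvKB 0).foldl
    (fun d p => d.insert p.2 (PySem.Int.mod p.1 8, PySem.Int.floordiv p.1 8))
    PySem.Dict.empty

def tv_remote_alt (word : String) : Int :=
  -- pass 1: freq = counts of adjacent pairs, cursor starts on 'a'; pass 2: len(word) + sum of n * distance over freq.items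
  ((word.toList.foldl
      (fun (s : PySem.Dict (Char × Char) Int × Char) ch =>
        (s.1.insert (s.2, ch) (s.1.getD (s.2, ch) 0 + 1), ch))
      (PySem.Dict.empty, 'a')).1).items.foldl
    (fun total p =>
      total + p.2 * (|(pvPosD.getD p.1.1 (0, 0)).1 - (pvPosD.getD p.1.2 (0, 0)).1| +
                     |(pvPosD.getD p.1.1 (0, 0)).2 - (pvPosD.getD p.1.2 (0, 0)).2|))
    (word.toList.length : Int)

-- ===== PRECONDITION & SPEC =====
-- Pre_ excludes exactly the words containing a character not on KEYBOARD, where A raises ValueError (and B raises KeyError).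
def Pre_tv_remote (word : String) : Prop := (word.toList.all (fun c => pvKB.contains c)) = true
instance (word : String) : Decidable (Pre_tv_remote word) := by unfold Pre_tv_remote; infer_instance
def pvWitness_tv_remote : String := "hello.1"

def Spec_tv_remote (word : String) (out : Int) : Prop := out = tv_remote_alt word
instance (word : String) (out : Int) : Decidable (Spec_tv_remote word out) := by unfold Spec_tv_remote; infer_instance

-- ===== CLAIM (what is proved, stated in full; the proofs are below) =====
def Claim_equal_tv_remote : Prop := ∀ (word : String), Dom_tv_remote word → Pre_tv_remote word → Spec_tv_remote word (tv_remote word)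

-- ===== LEMMAS AND PROOFS =====

-- the list of adjacent key pairs, starting from cursor position p
def pvPairs : Char → List Char → List (Char × Char)
  | _, [] => []
  | p, c :: t => (p, c) :: pvPairs c t

-- keypad coordinate of a char, as A computes it
def pvPos (c : Char) : Int × Int := (PySem.Int.mod (pvIdx c) 8, PySem.Int.floordiv (pvIdx c) 8)

-- Manhattan distance of a pair via pvPos
def pvDistA (q : Char × Char) : Int :=
  |(pvPos q.1).1 - (pvPos q.2).1| + |(pvPos q.1).2 - (pvPos q.2).2|

-- A's fold computes len + sum of pair distances
theorem pvA_fold (l : List Char) (cnt : Int) (p : Char) :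
    (l.foldl
      (fun (s : Int × Int × Int) c =>
        let i := pvIdx c
        let cx := PySem.Int.mod i 8
        let cy := PySem.Int.floordiv i 8
        (s.1 + |cx - s.2.1| + |cy - s.2.2| + 1, cx, cy))
      (cnt, pvPos p)).1
    = cnt + (l.length : Int) + ((pvPairs p l).map pvDistA).sum := by
  induction l generalizing cnt p with
  | nil => simp [pvPairs]
  | cons c t ih =>
    simp only [List.foldl_cons, pvPairs, List.map_cons, List.sum_cons]
    have : (PySem.Int.mod (pvIdx c) 8, PySem.Int.floordiv (pvIdx c) 8) = pvPos c := rfl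
    rw [show ((cnt, pvPos p).1 + |PySem.Int.mod (pvIdx c) 8 - (cnt, pvPos p).2.1| +
        |PySem.Int.floordiv (pvIdx c) 8 - (cnt, pvPos p).2.2| + 1,
        PySem.Int.mod (pvIdx c) 8, PySem.Int.floordiv (pvIdx c) 8)
      = (cnt + pvDistA (p, c) + 1, pvPos c) from by
        simp [pvDistA, pvPos, abs_sub_comm]; ring]
    rw [ih]
    simp only [List.length_cons]
    push_cast
    ring

-- B's pass-1 fold is the counter of pvPairs
theorem pvB_freq (l : List Char) (d : PySem.Dict (Char × Char) Int) (p : Char) :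
    (l.foldl
      (fun (s : PySem.Dict (Char × Char) Int × Char) ch =>
        (s.1.insert (s.2, ch) (s.1.getD (s.2, ch) 0 + 1), ch))
      (d, p)).1
    = (pvPairs p l).foldl (fun d x => d.insert x (d.getD x 0 + 1)) d := by
  induction l generalizing d p with
  | nil => simp [pvPairs]
  | cons c t ih => simp [pvPairs, ih]

-- the dict lookup agrees with A's index computation on keyboard chars
set_option maxRecDepth 20000 in
theorem pvPosD_eq (c : Char) (h : c ∈ pvKB) : pvPosD.getD c (0, 0) = pvPos c := by
  have : pvKB.all (fun c => pvPosD.getD c (0, 0) == pvPos c) = true := by decide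
  have := List.all_eq_true.mp this c h
  exact eq_of_beq this

-- components of pvPairs stay among p and l
theorem pvPairs_mem (p : Char) (l : List Char) (q : Char × Char) (hq : q ∈ pvPairs p l) :
    (q.1 = p ∨ q.1 ∈ l) ∧ q.2 ∈ l := by
  induction l generalizing p with
  | nil => simp [pvPairs] at hq
  | cons c t ih =>
    simp only [pvPairs, List.mem_cons] at hq
    rcases hq with rfl | hq
    · simp
    · rcases ih c hq with ⟨h1, h2⟩
      refine ⟨?_, by simp [h2]⟩
      rcases h1 with rfl | h1 <;> simp [*]

-- sum over the counter's items of count*f equals the plain sum of f over the list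
theorem pvCounter_sum (l : List (Char × Char)) (f : Char × Char → Int) :
    (((PySem.Dict.counter l).items.map (fun p => p.2 * f p.1)).sum)
    = (l.map f).sum := by
  rw [PySem.Dict.items_counter, List.map_map]
  have hnd : (PySem.Set.ofList l).Nodup := PySem.Set.nodup_ofList l
  have h2 : (PySem.Set.ofList l).toFinset = l.toFinset := by
    ext x; simp [List.mem_toFinset, PySem.Set.mem_ofList]
  rw [← List.sum_toFinset _ hnd, h2, Finset.sum_list_map_count l f]
  apply Finset.sum_congr rfl
  intro x _
  simp only [Function.comp_apply]
  rw [nsmul_eq_mul]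
  congr 1
  norm_cast
  simp only [List.count_eq_countP]
  apply List.countP_congr
  intro a _
  simp

-- B's pass-2 fold is init + the items sum
theorem pvFold_add (items : List ((Char × Char) × Int)) (init : Int)
    (g : (Char × Char) × Int → Int) :
    items.foldl (fun total p => total + g p) init = init + (items.map g).sum := by
  induction items generalizing init with
  | nil => simp
  | cons q t ih => simp [ih]; ring

-- ===== VERDICT (by name: the statement is the Claim_ definition above) =====
theorem tv_remote_spec : Claim_equal_tv_remote := by
  intro word _ hpre
  unfold Spec_tv_remote tv_remote tv_remote_alt
  have hpre' : ∀ c ∈ word.toList, c ∈ pvKB := by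
    intro c hc
    have := List.all_eq_true.mp hpre c hc
    simpa using this
  have hA := pvA_fold word.toList 0 'a'
  have ha : pvPos 'a' = (0, 0) := by decide
  rw [ha] at hA
  rw [hA]
  rw [pvB_freq word.toList PySem.Dict.empty 'a',
      PySem.Dict.foldl_insert_getD_add_one_eq_counter]
  rw [pvFold_add _ _ (fun p =>
      p.2 * (|(pvPosD.getD p.1.1 (0,0)).1 - (pvPosD.getD p.1.2 (0,0)).1| +
             |(pvPosD.getD p.1.1 (0,0)).2 - (pvPosD.getD p.1.2 (0,0)).2|))]
  have hfun : (fun p : (Char × Char) × Int =>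
      p.2 * (|(pvPosD.getD p.1.1 (0,0)).1 - (pvPosD.getD p.1.2 (0,0)).1| +
             |(pvPosD.getD p.1.1 (0,0)).2 - (pvPosD.getD p.1.2 (0,0)).2|))
      = (fun p : (Char × Char) × Int => p.2 * ((fun q : Char × Char =>
          |(pvPosD.getD q.1 (0,0)).1 - (pvPosD.getD q.2 (0,0)).1| +
          |(pvPosD.getD q.1 (0,0)).2 - (pvPosD.getD q.2 (0,0)).2|) p.1)) := rfl
  rw [hfun]
  rw [pvCounter_sum (pvPairs 'a' word.toList) (fun q : Char × Char =>
      |(pvPosD.getD q.1 (0,0)).1 - (pvPosD.getD q.2 (0,0)).1| +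
      |(pvPosD.getD q.1 (0,0)).2 - (pvPosD.getD q.2 (0,0)).2|)]
  have hmapeq : (pvPairs 'a' word.toList).map (fun q =>
      |(pvPosD.getD q.1 (0,0)).1 - (pvPosD.getD q.2 (0,0)).1| +
      |(pvPosD.getD q.1 (0,0)).2 - (pvPosD.getD q.2 (0,0)).2|)
      = (pvPairs 'a' word.toList).map pvDistA := by
    apply List.map_congr_left
    intro q hq
    rcases pvPairs_mem 'a' word.toList q hq with ⟨h1, h2⟩
    have hq1 : q.1 ∈ pvKB := by
      rcases h1 with h1 | h1
      · rw [h1]; decide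
      · exact hpre' _ h1
    have hq2 : q.2 ∈ pvKB := hpre' _ h2
    rw [pvPosD_eq q.1 hq1, pvPosD_eq q.2 hq2]
    rfl
  rw [hmapeq]
  ring
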